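-- pv_equiv track=rewrite | github.com/nhamil/shogi-util | shogiutil/usiwrapcli.py | uci_to_usi_setoption
-- ===== SOURCE A (Python) =====
-- UCI_TO_USI_OPTIONS = {
--     'Hash': 'USI_Hash',
--     'UCI_Variant': 'USI_Variant'
-- }
--
-- def uci_to_usi_setoption(cmd):
--     if len(cmd) < 3 or cmd[1] != 'name':
--         return cmd
--
--     name_mode = True
--     name = []
--     after = []
--
--     # UCI options can have spaces so get the whole name
--     for term in cmd[2:]:
--         if term == 'value':
--             name_mode = False
--
--         if name_mode:
--             name.append(term)
--         else:
--             after.append(term)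
--
--     # USI options may not have spaces
--     name = '_'.join(name)
--     name = UCI_TO_USI_OPTIONS.get(name, name)
--
--     return cmd[:2] + [name] + after
-- ===== SOURCE B (Python) =====
-- UCI_TO_USI_OPTIONS = {
--     'Hash': 'USI_Hash',
--     'UCI_Variant': 'USI_Variant'
-- }
--
-- def uci_to_usi_setoption(cmd):
--     if len(cmd) < 3 or cmd[1] != 'name':
--         return cmd
--     terms = cmd[2:]
--     if 'value' in terms:
--         i = terms.index('value')
--         name_parts, after = terms[:i], terms[i:]
--     else:
--         name_parts, after = terms, []
--     name = '_'.join(name_parts)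
--     return cmd[:2] + [UCI_TO_USI_OPTIONS.get(name, name)] + after
-- ===== Notes on version B (the rewrite author's own statement) =====
-- stated objective: simpler
-- what changed: Replaces the per-term boolean-flag accumulation loop with a single index-of-'value' search plus two slices of the tail.
import Mathlib
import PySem

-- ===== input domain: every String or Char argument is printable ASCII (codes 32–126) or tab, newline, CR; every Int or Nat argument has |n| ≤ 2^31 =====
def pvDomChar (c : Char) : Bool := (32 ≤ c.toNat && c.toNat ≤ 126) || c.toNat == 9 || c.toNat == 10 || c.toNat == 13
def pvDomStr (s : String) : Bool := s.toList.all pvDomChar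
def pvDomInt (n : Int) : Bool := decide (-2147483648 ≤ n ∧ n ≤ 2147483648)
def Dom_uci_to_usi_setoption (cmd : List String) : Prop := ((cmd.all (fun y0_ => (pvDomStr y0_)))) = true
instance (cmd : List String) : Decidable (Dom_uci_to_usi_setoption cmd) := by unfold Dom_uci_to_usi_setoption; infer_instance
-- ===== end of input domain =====

-- B replaces A's per-term boolean-flag loop with one index-of-'value' search plus two slices (simpler decomposition).

-- ===== PORT A =====
def pvOptsA : PySem.Dict String String :=
  (PySem.Dict.empty.insert "Hash" "USI_Hash").insert "UCI_Variant" "USI_Variant"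

-- loop body of A's 'for term in cmd[2:]' with state (name_mode, name, after)
def pvStepA (s : Bool × List String × List String) (term : String) : Bool × List String × List String :=
  let nm := if term = "value" then false else s.1
  if nm then (nm, s.2.1 ++ [term], s.2.2) else (nm, s.2.1, s.2.2 ++ [term])

def uci_to_usi_setoption (cmd : List String) : List String :=
  if cmd.length < 3 ∨ cmd[1]? ≠ some "name" then cmd
  else
    let st := (PySem.List.slice cmd (some 2) none).foldl pvStepA (true, [], [])
    let name := PySem.Str.join "_" st.2.1
    let name := pvOptsA.getD name name
    PySem.List.slice cmd none (some 2) ++ [name] ++ st.2.2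

-- ===== PORT B =====
def pvOptsB : PySem.Dict String String :=
  PySem.Dict.ofList [("Hash", "USI_Hash"), ("UCI_Variant", "USI_Variant")]

def uci_to_usi_setoption_alt (cmd : List String) : List String :=
  if cmd.length < 3 ∨ cmd[1]? ≠ some "name" then cmd
  else
    let terms := PySem.List.slice cmd (some 2) none
    let split :=
      match PySem.List.index? terms "value" with
      | some i => (terms.take i, terms.drop i)
      | none => (terms, ([] : List String))
    let name := PySem.Str.join "_" split.1
    PySem.List.slice cmd none (some 2) ++ [pvOptsB.getD name name] ++ split.2

-- ===== PRECONDITION & SPEC =====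
def Spec_uci_to_usi_setoption (cmd : List String) (out : List String) : Prop := out = uci_to_usi_setoption_alt cmd
instance (cmd : List String) (out : List String) : Decidable (Spec_uci_to_usi_setoption cmd out) := by unfold Spec_uci_to_usi_setoption; infer_instance

-- ===== CLAIM (what is proved, stated in full; the proofs are below) =====
def Claim_equal_uci_to_usi_setoption : Prop := ∀ (cmd : List String), Dom_uci_to_usi_setoption cmd → Spec_uci_to_usi_setoption cmd (uci_to_usi_setoption cmd)

-- ===== LEMMAS AND PROOFS =====

-- once name_mode is false, everything goes to 'after'
lemma pvStepA_false (ts : List String) (n a : List String) :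
    ts.foldl pvStepA (false, n, a) = (false, n, a ++ ts) := by
  induction ts generalizing a with
  | nil => simp
  | cons t ts ih =>
      simp only [List.foldl_cons]
      rw [show pvStepA (false, n, a) t = (false, n, a ++ [t]) by
        simp [pvStepA]]
      rw [ih]; simp

-- the flag loop from the initial state splits the list at the first 'value'
lemma pvStepA_true (ts : List String) (n a : List String) :
    ts.foldl pvStepA (true, n, a) =
      match PySem.List.index? ts "value" with
      | some i => (false, n ++ ts.take i, a ++ ts.drop i)
      | none => (true, n ++ ts, a) := by
  induction ts generalizing n with
  | nil => simp
  | cons t ts ih =>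
      by_cases ht : t = "value"
      · subst ht
        rw [PySem.List.index?_cons_self]
        simp only [List.foldl_cons]
        rw [show pvStepA (true, n, a) "value" = (false, n, a ++ ["value"]) by
          simp [pvStepA]]
        rw [pvStepA_false]
        simp
      · rw [PySem.List.index?_cons_of_ne ts ht]
        simp only [List.foldl_cons]
        rw [show pvStepA (true, n, a) t = (true, n ++ [t], a) by
          simp [pvStepA, ht]]
        rw [ih]
        cases PySem.List.index? ts "value" <;> simp

-- ===== VERDICT (by name: the statement is the Claim_ definition above) =====
theorem uci_to_usi_setoption_spec : Claim_equal_uci_to_usi_setoption := by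
  intro cmd _
  unfold Spec_uci_to_usi_setoption uci_to_usi_setoption uci_to_usi_setoption_alt
  by_cases hg : cmd.length < 3 ∨ cmd[1]? ≠ some "name"
  · simp [hg]
  · simp only [hg, if_false]
    rw [pvStepA_true]
    have hd : pvOptsA = pvOptsB := by decide
    cases h : PySem.List.index? (PySem.List.slice cmd (some 2) none) "value" <;>
      simp [hd]
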